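-- pv_equiv track=rewrite | github.com/addison-ch/Ditto | generator.py | update_chain
-- ===== SOURCE A (Python) =====
-- from collections import defaultdict
--
-- def fix_word(word):
--     n = ""
--     for l in range(len(word)):
--         if str(l).isalnum() or l == '!' or l == "." or l == '?' or l == "," or l == "'":
--             n += word[l]
--     return(n)
--
-- def create_markov_chain(text):
--     words = text.split()
--     markov_dict = defaultdict(list)
--
--     for current_word, next_word in zip(words[0:-1], words[1:]):
--         current_word = fix_word(current_word)
--         next_word = fix_word(next_word)
--         markov_dict[current_word].append(next_word)
--
--     markov_dict = dict(markov_dict)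
--     return markov_dict
--
-- def update_chain(data, chain, query):
--
--     for item in data:
--         a = create_markov_chain(item[query])
--
--         for x, y in a.items():
--             if x in chain.keys():
--                 chain[x] += y
--             else:
--                 chain[x] = y
--
--     return chain
-- ===== SOURCE B (Python) =====
-- def fix_word(word):
--     n = ""
--     for l in range(len(word)):
--         if str(l).isalnum() or l == '!' or l == "." or l == '?' or l == "," or l == "'":
--             n += word[l]
--     return(n)
--
-- def update_chain(data, chain, query):
--     for item in data:
--         words = item[query].split()
--         for i in range(len(words) - 1):
--             cur = fix_word(words[i])
--             if cur in chain:
--                 chain[cur].append(fix_word(words[i + 1]))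
--             else:
--                 chain[cur] = [fix_word(words[i + 1])]
--     return chain
-- ===== Notes on version B (the rewrite author's own statement) =====
-- stated objective: simpler
-- what changed: B removes the per-item intermediate Markov dict and its merge pass: it walks each item's consecutive word pairs once and appends fix_word(next) directly into the accumulator chain, producing identical keys, lists and insertion order.
import Mathlib
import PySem

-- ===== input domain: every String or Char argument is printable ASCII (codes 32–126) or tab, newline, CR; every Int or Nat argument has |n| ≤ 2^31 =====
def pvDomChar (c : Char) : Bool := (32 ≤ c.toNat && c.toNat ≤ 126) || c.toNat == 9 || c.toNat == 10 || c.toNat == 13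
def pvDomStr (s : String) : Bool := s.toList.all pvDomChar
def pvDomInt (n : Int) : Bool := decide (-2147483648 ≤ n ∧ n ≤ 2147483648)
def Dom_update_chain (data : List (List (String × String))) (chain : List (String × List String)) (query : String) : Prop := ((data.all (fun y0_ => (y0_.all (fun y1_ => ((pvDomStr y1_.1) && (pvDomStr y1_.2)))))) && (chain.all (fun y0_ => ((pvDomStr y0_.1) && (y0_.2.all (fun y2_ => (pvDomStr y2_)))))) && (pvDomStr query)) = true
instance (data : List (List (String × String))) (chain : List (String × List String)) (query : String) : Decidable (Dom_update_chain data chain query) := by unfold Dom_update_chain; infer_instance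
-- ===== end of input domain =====

-- B fuses A's build-a-per-item-dict-then-merge two-pass structure into one direct pass over the
-- consecutive word pairs, appending into the accumulator chain itself (simpler; same keys, lists
-- and insertion order). Both A and B mutate `chain` in place identically in Python; the theorems
-- here are about the returned value.


-- ===== PORT A =====
-- fix_word: the loop variable l is an int, so in Python 'l == "!"' etc. are all False (ported as
-- literal 'false' disjuncts) and the guard is just str(l).isalnum(); word[l] is always in range.
def fix_word (word : String) : String :=
  String.ofList ((PySem.List.pyRange 0 (PySem.Str.len word) 1).foldl
    (fun n l =>
      if PySem.Str.strIsalnum (PySem.Int.toStr l) || false || false || false || false || false then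
        n ++ [PySem.List.pyGetD word.toList l ' ']
      else n) [])

def create_markov_chain (text : String) : PySem.Dict String (List String) :=
  let words := PySem.Str.split₀ text
  -- defaultdict(list): markov_dict[cw].append(nw) is modify cw [] (· ++ [nw]); dict(markov_dict) is the identity here
  (List.zip (PySem.List.slice words none (some (-1))) (PySem.List.slice words (some 1) none)).foldl
    (fun d p => d.modify (fix_word p.1) [] (· ++ [fix_word p.2])) PySem.Dict.empty

def update_chain (data : List (List (String × String))) (chain : List (String × List String)) (query : String) : List (String × List String) :=
  (data.foldl (fun c item =>
      let a := create_markov_chain ((PySem.Dict.mk item).getD query "")  -- item[query]; KeyError excluded by Pre_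
      a.items.foldl (fun c xy =>
        if c.contains xy.1 then c.modify xy.1 [] (· ++ xy.2) else c.insert xy.1 xy.2) c)
    (PySem.Dict.mk chain)).items

-- ===== PORT B =====
def fix_word_alt (word : String) : String :=
  String.ofList ((PySem.List.pyRange 0 (PySem.Str.len word) 1).foldl
    (fun n l =>
      if PySem.Str.strIsalnum (PySem.Int.toStr l) || false || false || false || false || false then
        n ++ [PySem.List.pyGetD word.toList l ' ']
      else n) [])

def update_chain_alt (data : List (List (String × String))) (chain : List (String × List String)) (query : String) : List (String × List String) :=
  (data.foldl (fun c item =>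
      let words := PySem.Str.split₀ ((PySem.Dict.mk item).getD query "")  -- item[query]; KeyError excluded by Pre_
      (PySem.List.pyRange 0 ((words.length : Int) - 1) 1).foldl (fun c i =>
        let cur := fix_word_alt (PySem.List.pyGetD words i "")
        if c.contains cur then c.modify cur [] (· ++ [fix_word_alt (PySem.List.pyGetD words (i + 1) "")])
        else c.insert cur [fix_word_alt (PySem.List.pyGetD words (i + 1) "")]) c)
    (PySem.Dict.mk chain)).items

-- ===== PRECONDITION & SPEC =====
-- Pre_ excludes exactly the inputs where Python's item[query] raises KeyError (query missing from some item).
def Pre_update_chain (data : List (List (String × String))) (chain : List (String × List String)) (query : String) : Prop :=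
  ∀ item ∈ data, query ∈ item.map Prod.fst
instance (data : List (List (String × String))) (chain : List (String × List String)) (query : String) : Decidable (Pre_update_chain data chain query) := by unfold Pre_update_chain; infer_instance

def pvWitness_update_chain : (List (List (String × String))) × (List (String × List String)) × String :=
  ([[("t", "a b a c")], [("t", "b a")]], [("a", ["x"])], "t")

def Spec_update_chain (data : List (List (String × String))) (chain : List (String × List String)) (query : String) (out : List (String × List String)) : Prop := out = update_chain_alt data chain query
instance (data : List (List (String × String))) (chain : List (String × List String)) (query : String) (out : List (String × List String)) : Decidable (Spec_update_chain data chain query out) := by unfold Spec_update_chain; infer_instance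

-- ===== CLAIM (what is proved, stated in full; the proofs are below) =====
def Claim_equal_update_chain : Prop := ∀ (data : List (List (String × String))) (chain : List (String × List String)) (query : String), Dom_update_chain data chain query → Pre_update_chain data chain query → Spec_update_chain data chain query (update_chain data chain query)

-- ===== LEMMAS AND PROOFS =====

-- the one operation both programs perform on the accumulator: chain[k] = chain.get(k, []) + v
def insApp (c : PySem.Dict String (List String)) (k : String) (v : List String) : PySem.Dict String (List String) :=
  c.insert k (c.getD k [] ++ v)

lemma mergeStep_eq (c : PySem.Dict String (List String)) (k : String) (v : List String) :
    (if c.contains k then c.modify k [] (· ++ v) else c.insert k v) = insApp c k v := by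
  by_cases h : c.contains k = true
  · simp [h, PySem.Dict.modify, insApp]
  · simp only [Bool.not_eq_true] at h
    simp [h, insApp, PySem.Dict.getD_of_not_contains _ _ h]

-- two in-place inserts at distinct keys commute when the first key is already present
lemma insert_insert_comm_of_contains (c : PySem.Dict String (List String)) {k k' : String}
    (a b : List String) (hk : c.contains k = true) (hne : k' ≠ k) :
    (c.insert k a).insert k' b = (c.insert k' b).insert k a := by
  have c1 : (c.insert k a).contains k' = c.contains k' := by
    rw [PySem.Dict.contains_insert]; simp [hne]
  have c2 : (c.insert k' b).contains k = true := by
    rw [PySem.Dict.contains_insert]; simp [hk]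
  apply PySem.Dict.ext
  by_cases hk' : c.contains k' = true
  · rw [PySem.Dict.items_insert_of_contains _ b (c1.trans hk'),
      PySem.Dict.items_insert_of_contains _ a hk,
      PySem.Dict.items_insert_of_contains _ a c2,
      PySem.Dict.items_insert_of_contains _ b hk',
      List.map_map, List.map_map]
    apply List.map_congr_left
    intro p _
    by_cases hp : p.1 = k <;> by_cases hp' : p.1 = k' <;>
      simp_all [Function.comp, Ne.symm hne]
  · simp only [Bool.not_eq_true] at hk'
    rw [PySem.Dict.items_insert_of_not_contains _ b (c1.trans hk'),
      PySem.Dict.items_insert_of_contains _ a hk,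
      PySem.Dict.items_insert_of_contains _ a c2,
      PySem.Dict.items_insert_of_not_contains _ b hk',
      List.map_append]
    simp [hne]

-- insApp at an already-present key commutes with insApp at any other key
lemma insApp_comm (c : PySem.Dict String (List String)) {k k' : String} (v w : List String)
    (hk : c.contains k = true) (hne : k' ≠ k) :
    insApp (insApp c k v) k' w = insApp (insApp c k' w) k v := by
  unfold insApp
  rw [PySem.Dict.getD_insert_of_ne _ _ _ hne, PySem.Dict.getD_insert_of_ne _ _ _ (Ne.symm hne)]
  exact insert_insert_comm_of_contains c _ _ hk hne

lemma insApp_insApp_self (c : PySem.Dict String (List String)) (k : String) (v w : List String) :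
    insApp (insApp c k v) k w = insApp c k (v ++ w) := by
  unfold insApp
  rw [PySem.Dict.getD_insert_self, PySem.Dict.insert_insert_self, List.append_assoc]

lemma contains_insApp (c : PySem.Dict String (List String)) (k k' : String) (v : List String)
    (h : c.contains k = true) : (insApp c k' v).contains k = true := by
  unfold insApp
  rw [PySem.Dict.contains_insert]
  simp [h]

-- merging a list of grouped entries into the chain
def mergeAll (l : List (String × List String)) (c : PySem.Dict String (List String)) :
    PySem.Dict String (List String) :=
  l.foldl (fun c p => insApp c p.1 p.2) c

-- an insApp at a key absent from l moves out of a mergeAll over l (the key stays present throughout)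
lemma mergeAll_insApp_comm (l : List (String × List String)) (k : String) (v : List String) :
    ∀ c, c.contains k = true → (∀ p ∈ l, p.1 ≠ k) →
    mergeAll l (insApp c k v) = insApp (mergeAll l c) k v := by
  induction l with
  | nil => intro c _ _; rfl
  | cons p t ih =>
    intro c hc hl
    have hp : p.1 ≠ k := hl p (List.mem_cons_self)
    show mergeAll t (insApp (insApp c k v) p.1 p.2) = insApp (mergeAll t (insApp c p.1 p.2)) k v
    rw [insApp_comm c v p.2 hc hp]
    exact ih _ (contains_insApp c k p.1 p.2 hc) (fun q hq => hl q (List.mem_cons_of_mem _ hq))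

-- KEY: merging the items of (d with v appended at k) = merging d's items, then appending v at k
lemma mergeAll_insApp (d : PySem.Dict String (List String)) (k : String) (v : List String)
    (hnd : d.keys.Nodup) (c : PySem.Dict String (List String)) :
    mergeAll (insApp d k v).items c = insApp (mergeAll d.items c) k v := by
  by_cases hk : d.contains k = true
  · -- k already a key of d: split d.items around its unique (k, l0) entry
    have hsome : (d.get? k).isSome := by rw [← PySem.Dict.contains_eq_isSome_get?]; exact hk
    obtain ⟨l0, hget⟩ := Option.isSome_iff_exists.mp hsome
    have hmemit : (k, l0) ∈ d.items := PySem.Dict.mem_items_of_get?_eq_some d hget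
    obtain ⟨pre, suf, hsplit⟩ := List.append_of_mem hmemit
    have hndk : d.keys = pre.map Prod.fst ++ k :: suf.map Prod.fst := by
      simp [PySem.Dict.keys, hsplit]
    rw [hndk, List.nodup_append] at hnd
    obtain ⟨h1, h2, h3⟩ := hnd
    rw [List.nodup_cons] at h2
    have hkpre : k ∉ pre.map Prod.fst := fun h => h3 k h k List.mem_cons_self rfl
    have hpre : ∀ p ∈ pre, p.1 ≠ k := fun p hp hpk => hkpre (hpk ▸ List.mem_map_of_mem hp)
    have hsuf : ∀ p ∈ suf, p.1 ≠ k := fun p hp hpk => h2.1 (hpk ▸ List.mem_map_of_mem hp)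
    have hgetD : d.getD k [] = l0 := by rw [PySem.Dict.getD_eq_get?_getD, hget]; rfl
    have e1 : List.map (fun p => if (p.1 == k) = true then (k, l0 ++ v) else p) pre = pre := by
      rw [show pre = pre.map id by rw [List.map_id]]
      rw [List.map_map]
      apply List.map_congr_left
      intro p hp
      simp [hpre p hp]
    have e2 : List.map (fun p => if (p.1 == k) = true then (k, l0 ++ v) else p) suf = suf := by
      rw [show suf = suf.map id by rw [List.map_id]]
      rw [List.map_map]
      apply List.map_congr_left
      intro p hp
      simp [hsuf p hp]
    have hitems : (insApp d k v).items = pre ++ (k, l0 ++ v) :: suf := by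
      unfold insApp
      rw [hgetD, PySem.Dict.items_insert_of_contains _ _ hk, hsplit, List.map_append,
        List.map_cons, e1, e2]
      simp
    rw [hitems, hsplit]
    show (pre ++ (k, l0 ++ v) :: suf).foldl (fun c p => insApp c p.1 p.2) c
      = insApp ((pre ++ (k, l0) :: suf).foldl (fun c p => insApp c p.1 p.2) c) k v
    rw [List.foldl_append, List.foldl_append, List.foldl_cons, List.foldl_cons]
    have h4 : insApp (List.foldl (fun c p => insApp c p.1 p.2) c pre) k (l0 ++ v)
        = insApp (insApp (List.foldl (fun c p => insApp c p.1 p.2) c pre) k l0) k v :=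
      (insApp_insApp_self _ k l0 v).symm
    rw [h4]
    exact mergeAll_insApp_comm suf k v _ (PySem.Dict.contains_insert_self _ _ _) hsuf
  · -- fresh key: the insert appends (k, v) at the end of the items
    simp only [Bool.not_eq_true] at hk
    have hit : (insApp d k v).items = d.items ++ [(k, v)] := by
      unfold insApp
      rw [PySem.Dict.getD_of_not_contains _ _ hk]
      simp [PySem.Dict.items_insert_of_not_contains _ _ hk]
    rw [hit]
    show (d.items ++ [(k, v)]).foldl (fun c p => insApp c p.1 p.2) c = _
    rw [List.foldl_append]
    rfl

-- CORE: merging the grouped dict built from qs equals folding qs directly into the chain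
lemma mergeAll_build (qs : List (String × String)) :
    ∀ (d : PySem.Dict String (List String)), d.keys.Nodup →
    ∀ c, mergeAll (qs.foldl (fun d q => insApp d q.1 [q.2]) d).items c
      = qs.foldl (fun c q => insApp c q.1 [q.2]) (mergeAll d.items c) := by
  induction qs with
  | nil => intro d _ c; rfl
  | cons q t ih =>
    intro d hnd c
    have hnd' : (insApp d q.1 [q.2]).keys.Nodup := PySem.Dict.nodup_keys_insert _ _ _ hnd
    rw [List.foldl_cons, ih _ hnd', List.foldl_cons, mergeAll_insApp d q.1 [q.2] hnd c]

-- the pair list both programs traverse: consecutive word pairs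
lemma range_pairs {α : Type} (ws : List α) (d : α) :
    (List.range (ws.length - 1)).map (fun i => (ws.getD i d, ws.getD (i + 1) d))
      = ws.zip (ws.drop 1) := by
  apply List.ext_getElem
  · simp
  · intro i h1 h2
    simp only [List.length_map, List.length_range] at h1
    simp only [List.getElem_map, List.getElem_range, List.getElem_zip, List.getElem_drop]
    rw [List.getD_eq_getElem ws d (by omega), List.getD_eq_getElem ws d (by omega)]
    simp [Nat.add_comm]

lemma zip_dropLast {α : Type} (ws : List α) : ws.dropLast.zip (ws.drop 1) = ws.zip (ws.drop 1) := by
  apply List.ext_getElem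
  · simp [List.length_dropLast]
  · intro i h1 h2
    simp [List.getElem_zip, List.getElem_dropLast]

lemma fix_word_alt_eq : fix_word_alt = fix_word := rfl

-- the canonical form both per-item passes reduce to
def itemFold (text : String) (c : PySem.Dict String (List String)) : PySem.Dict String (List String) :=
  (((PySem.Str.split₀ text).zip ((PySem.Str.split₀ text).drop 1)).map
      (fun p => (fix_word p.1, fix_word p.2))).foldl (fun c q => insApp c q.1 [q.2]) c

lemma stepA_eq (text : String) (c : PySem.Dict String (List String)) :
    (create_markov_chain text).items.foldl (fun c xy =>
        if c.contains xy.1 then c.modify xy.1 [] (· ++ xy.2) else c.insert xy.1 xy.2) c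
      = itemFold text c := by
  simp only [create_markov_chain, itemFold]
  rw [PySem.List.slice_to_neg_one, PySem.List.slice_from_one, ← List.drop_one, zip_dropLast]
  have hmod : (fun (d : PySem.Dict String (List String)) (p : String × String) =>
      d.modify (fix_word p.1) [] (· ++ [fix_word p.2]))
      = fun d p => insApp d (fix_word p.1) [fix_word p.2] := rfl
  rw [hmod]
  have hfold : ∀ (l : List (String × String)) (e : PySem.Dict String (List String)),
      l.foldl (fun d p => insApp d (fix_word p.1) [fix_word p.2]) e
      = (l.map (fun p => (fix_word p.1, fix_word p.2))).foldl (fun d q => insApp d q.1 [q.2]) e := by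
    intro l e; rw [List.foldl_map]
  rw [hfold]
  have hmerge : (fun (c : PySem.Dict String (List String)) (xy : String × List String) =>
      if c.contains xy.1 then c.modify xy.1 [] (· ++ xy.2) else c.insert xy.1 xy.2)
      = fun c xy => insApp c xy.1 xy.2 := by
    funext c xy; exact mergeStep_eq c xy.1 xy.2
  rw [hmerge]
  have := mergeAll_build (((PySem.Str.split₀ text).zip ((PySem.Str.split₀ text).drop 1)).map
      (fun p => (fix_word p.1, fix_word p.2))) PySem.Dict.empty PySem.Dict.nodup_keys_empty c
  simpa [mergeAll, PySem.Dict.empty] using this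

lemma stepB_eq (text : String) (c : PySem.Dict String (List String)) :
    (PySem.List.pyRange 0 (((PySem.Str.split₀ text).length : Int) - 1) 1).foldl (fun c i =>
        let cur := fix_word_alt (PySem.List.pyGetD (PySem.Str.split₀ text) i "")
        if c.contains cur then c.modify cur [] (· ++ [fix_word_alt (PySem.List.pyGetD (PySem.Str.split₀ text) (i + 1) "")])
        else c.insert cur [fix_word_alt (PySem.List.pyGetD (PySem.Str.split₀ text) (i + 1) "")]) c
      = itemFold text c := by
  set ws := PySem.Str.split₀ text with hws
  unfold itemFold
  rw [← hws]
  have hbody : (fun (c : PySem.Dict String (List String)) (i : Int) =>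
      let cur := fix_word_alt (PySem.List.pyGetD ws i "")
      if c.contains cur then c.modify cur [] (· ++ [fix_word_alt (PySem.List.pyGetD ws (i + 1) "")])
      else c.insert cur [fix_word_alt (PySem.List.pyGetD ws (i + 1) "")])
      = fun c i => insApp c (fix_word (PySem.List.pyGetD ws i "")) [fix_word (PySem.List.pyGetD ws (i + 1) "")] := by
    funext c i
    show (if c.contains (fix_word_alt (PySem.List.pyGetD ws i "")) then _ else _) = _
    rw [fix_word_alt_eq]
    exact mergeStep_eq c (fix_word (PySem.List.pyGetD ws i "")) [fix_word (PySem.List.pyGetD ws (i + 1) "")]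
  rw [hbody]
  -- turn the index loop into a loop over the mapped pair list
  have hmap : (PySem.List.pyRange 0 ((ws.length : Int) - 1) 1).map
      (fun i => (fix_word (PySem.List.pyGetD ws i ""), fix_word (PySem.List.pyGetD ws (i + 1) "")))
      = (ws.zip (ws.drop 1)).map (fun p => (fix_word p.1, fix_word p.2)) := by
    rw [PySem.List.pyRange_one, List.map_map, ← range_pairs ws "", List.map_map]
    have hlen : ((ws.length : Int) - 1 - 0).toNat = ws.length - 1 := by omega
    rw [hlen]
    apply List.map_congr_left
    intro i _
    have h0 : (0 : Int) + (i : Int) = ((i : Nat) : Int) := by omega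
    have h1 : ((i : Nat) : Int) + 1 = (((i + 1 : Nat)) : Int) := by push_cast; ring
    simp only [Function.comp, h0, h1, PySem.List.pyGetD_natCast]
  calc (PySem.List.pyRange 0 ((ws.length : Int) - 1) 1).foldl
        (fun c i => insApp c (fix_word (PySem.List.pyGetD ws i "")) [fix_word (PySem.List.pyGetD ws (i + 1) "")]) c
      = ((PySem.List.pyRange 0 ((ws.length : Int) - 1) 1).map
          (fun i => (fix_word (PySem.List.pyGetD ws i ""), fix_word (PySem.List.pyGetD ws (i + 1) "")))).foldl
          (fun c q => insApp c q.1 [q.2]) c := by rw [List.foldl_map]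
    _ = ((ws.zip (ws.drop 1)).map (fun p => (fix_word p.1, fix_word p.2))).foldl
          (fun c q => insApp c q.1 [q.2]) c := by rw [hmap]

-- ===== VERDICT (by name: the statement is the Claim_ definition above) =====
theorem update_chain_spec : Claim_equal_update_chain := by
  intro data chain query _ _
  unfold Spec_update_chain update_chain update_chain_alt
  congr 1
  have hstep : (fun (c : PySem.Dict String (List String)) (item : List (String × String)) =>
      let a := create_markov_chain ((PySem.Dict.mk item).getD query "")
      a.items.foldl (fun c xy =>
        if c.contains xy.1 then c.modify xy.1 [] (· ++ xy.2) else c.insert xy.1 xy.2) c)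
      = fun c item =>
        let words := PySem.Str.split₀ ((PySem.Dict.mk item).getD query "")
        (PySem.List.pyRange 0 ((words.length : Int) - 1) 1).foldl (fun c i =>
          let cur := fix_word_alt (PySem.List.pyGetD words i "")
          if c.contains cur then c.modify cur [] (· ++ [fix_word_alt (PySem.List.pyGetD words (i + 1) "")])
          else c.insert cur [fix_word_alt (PySem.List.pyGetD words (i + 1) "")]) c := by
    funext c item
    show (create_markov_chain ((PySem.Dict.mk item).getD query "")).items.foldl _ c = _
    rw [stepA_eq ((PySem.Dict.mk item).getD query "") c, stepB_eq ((PySem.Dict.mk item).getD query "") c]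
  rw [hstep]
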